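-- pv_equiv track=rewrite | github.com/mingu62-lee/Algorism | ExhaustiveSearch1/search.py | solution
-- ===== SOURCE A (Python) =====
-- def solution(answers):
--     sum1 = 0; sum2 = 0; sum3 = 0
--     s1 = [1,2,3,4,5]
--     s2 = [2,1,2,3,2,4,2,5]
--     s3 = [3,3,1,1,2,2,4,4,5,5]
--
--     for i in range(len(answers)):
--         if answers[i] == s1[i%5] :
--             sum1 = sum1 + 1
--         if answers[i] == s2[i%8] :
--             sum2 = sum2 + 1
--         if answers[i] == s3[i%10] :
--             sum3 = sum3 + 1
--
--     answer = []
--     if sum1 > sum2 and sum1 > sum3 :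
--         answer.append(1)
--     elif sum2 > sum1 and sum2 > sum3 :
--         answer.append(2)
--     elif sum3 > sum1 and sum3 > sum2 :
--         answer.append(3)
--     elif sum1 == sum2 and sum1 > sum3 :
--         answer.append(1)
--         answer.append(2)
--     elif sum1 == sum3 and sum1 > sum2 :
--         answer.append(1)
--         answer.append(3)
--     elif sum2 == sum3 and sum2 > sum1 :
--         answer.append(2)
--         answer.append(3)
--     else :
--         answer.append(1)
--         answer.append(2)
--         answer.append(3)
--     return answer
-- ===== SOURCE B (Python) =====
-- def solution(answers):
--     n = len(answers)
--     patterns = [[1, 2, 3, 4, 5], [2, 1, 2, 3, 2, 4, 2, 5], [3, 3, 1, 1, 2, 2, 4, 4, 5, 5]]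
--     ranked = []
--     for num, p in enumerate(patterns, 1):
--         tiled = (p * (n // len(p) + 1))[:n]
--         score = sum(a == b for a, b in zip(answers, tiled))
--         ranked.append((-score, num))
--     ranked.sort()
--     top = ranked[0][0]
--     return [num for neg, num in ranked if neg == top]
-- ===== Notes on version B (the rewrite author's own statement) =====
-- stated objective: alternative
-- what changed: B scores each pattern by materialising the pattern tiled to the answer length and summing an element-wise zip comparison (no index or modular arithmetic), then selects the winners by sorting (-score, number) pairs lexicographically and keeping the entries tied with the sorted head, replacing A's single interleaved three-accumulator index loop and 7-way if/elif cascade.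
import Mathlib
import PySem

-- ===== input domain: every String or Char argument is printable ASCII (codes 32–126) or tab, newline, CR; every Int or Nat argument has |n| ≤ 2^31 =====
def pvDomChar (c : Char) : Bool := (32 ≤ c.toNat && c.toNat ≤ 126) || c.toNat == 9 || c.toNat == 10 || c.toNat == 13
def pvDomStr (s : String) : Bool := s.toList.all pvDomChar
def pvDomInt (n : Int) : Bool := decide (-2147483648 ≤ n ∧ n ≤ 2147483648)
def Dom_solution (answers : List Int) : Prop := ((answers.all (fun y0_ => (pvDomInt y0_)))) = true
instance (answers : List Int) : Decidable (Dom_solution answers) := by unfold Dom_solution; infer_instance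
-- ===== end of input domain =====

-- B scores each pattern by tiling it to the answer length and summing a zip-wise comparison
-- (no index/modular arithmetic), then picks the winners by sorting (-score, number) pairs and
-- keeping the prefix tied with the best, instead of A's interleaved loop and 7-way cascade
-- (objective: alternative).

-- ===== PORT A =====
def solution (answers : List Int) : List Int :=
  let s1 : List Int := [1, 2, 3, 4, 5]
  let s2 : List Int := [2, 1, 2, 3, 2, 4, 2, 5]
  let s3 : List Int := [3, 3, 1, 1, 2, 2, 4, 4, 5, 5]
  let sums :=
    (PySem.List.pyRange 0 (answers.length : Int) 1).foldl
      (fun (acc : Int × Int × Int) i =>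
        ((if PySem.List.pyGetD answers i 0 = PySem.List.pyGetD s1 (PySem.Int.mod i 5) 0 then acc.1 + 1 else acc.1),
         (if PySem.List.pyGetD answers i 0 = PySem.List.pyGetD s2 (PySem.Int.mod i 8) 0 then acc.2.1 + 1 else acc.2.1),
         (if PySem.List.pyGetD answers i 0 = PySem.List.pyGetD s3 (PySem.Int.mod i 10) 0 then acc.2.2 + 1 else acc.2.2)))
      (0, 0, 0)
  let sum1 := sums.1
  let sum2 := sums.2.1
  let sum3 := sums.2.2
  if sum1 > sum2 ∧ sum1 > sum3 then [1]
  else if sum2 > sum1 ∧ sum2 > sum3 then [2]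
  else if sum3 > sum1 ∧ sum3 > sum2 then [3]
  else if sum1 = sum2 ∧ sum1 > sum3 then [1, 2]
  else if sum1 = sum3 ∧ sum1 > sum2 then [1, 3]
  else if sum2 = sum3 ∧ sum2 > sum1 then [2, 3]
  else [1, 2, 3]

-- ===== PORT B =====
-- 'p * m' (list repetition) is ported as (List.replicate m p).flatten; '[:n]' as PySem.List.slice;
-- 'sum(a == b for ...)' as the sum of a 0/1 map over the zip; 'ranked.sort()' (tuples compare
-- lexicographically) as PySem.List.sorted2; 'ranked[0]' via pyGetD (ranked always has 3 entries).
def solution_alt (answers : List Int) : List Int :=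
  let n : Int := (answers.length : Int)
  let patterns : List (List Int) :=
    [[1, 2, 3, 4, 5], [2, 1, 2, 3, 2, 4, 2, 5], [3, 3, 1, 1, 2, 2, 4, 4, 5, 5]]
  let ranked : List (Int × Int) :=
    (PySem.List.enumerate patterns 1).foldl
      (fun acc np =>
        let p := np.2
        let tiled := PySem.List.slice
          ((List.replicate ((PySem.Int.floordiv n (p.length : Int)) + 1).toNat p).flatten)
          none (some n)
        let score := ((answers.zip tiled).map (fun ab => if ab.1 == ab.2 then (1 : Int) else 0)).sum
        acc ++ [(-score, np.1)]) []
  let rankedS := PySem.List.sorted2 ranked (fun r => r.1) (fun r => r.2)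
  let top := (PySem.List.pyGetD rankedS 0 ((0 : Int), (0 : Int))).1
  (rankedS.filter (fun r => r.1 == top)).map (fun r => r.2)

-- ===== PRECONDITION & SPEC =====
def Spec_solution (answers : List Int) (out : List Int) : Prop := out = solution_alt answers
instance (answers : List Int) (out : List Int) : Decidable (Spec_solution answers out) := by unfold Spec_solution; infer_instance

-- ===== CLAIM =====
def Claim_equal_solution : Prop := ∀ (answers : List Int), Dom_solution answers → Spec_solution answers (solution answers)

-- ===== LEMMAS AND PROOFS =====

-- element i of the k-fold repetition of p is p[i % len p]
theorem pvFlatten_replicate_getD (p : List Int) (k i : Nat) (h : i < k * p.length) :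
    ((List.replicate k p).flatten).getD i 0 = p.getD (i % p.length) 0 := by
  induction k generalizing i with
  | zero => simp at h
  | succ k ih =>
    rw [Nat.succ_mul] at h
    rw [List.replicate_succ, List.flatten_cons]
    by_cases hi : i < p.length
    · rw [List.getD_append _ _ _ _ hi, Nat.mod_eq_of_lt hi]
    · rw [not_lt] at hi
      rw [List.getD_append_right _ _ _ _ hi]
      rw [ih (i - p.length) (by omega)]
      congr 1
      conv_rhs => rw [← Nat.sub_add_cancel hi, Nat.add_mod_right]

-- the tiled pattern, cut to length n, lists p[i % len p] for i < n
theorem pvTile_eq (p : List Int) (hp : p ≠ []) (k n : Nat) (h : n ≤ k * p.length) :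
    ((List.replicate k p).flatten).take n
      = (List.range n).map (fun i => p.getD (i % p.length) 0) := by
  have hp0 : 0 < p.length := List.length_pos_iff.mpr hp
  have hlen : ((List.replicate k p).flatten).length = k * p.length := by
    simp [List.length_flatten, List.map_replicate]
  apply List.ext_getElem
  · simp [List.length_take, hlen]; omega
  · intro i h1 h2
    have hi : i < n := by simp [List.length_take, hlen] at h1; omega
    rw [List.getElem_take]
    rw [← List.getD_eq_getElem _ 0 (by omega), pvFlatten_replicate_getD p k i (by omega)]
    rw [List.getElem_map, List.getElem_range, List.getD_eq_getElem _ 0 (Nat.mod_lt i hp0)]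

-- a zip-wise equality count against an indexed list is an index count
theorem pvCountP_zip (xs : List Int) (f : Nat → Int) :
    (xs.zip ((List.range xs.length).map f)).countP (fun ab => ab.1 == ab.2)
      = (List.range xs.length).countP (fun i => xs.getD i 0 == f i) := by
  induction xs generalizing f with
  | nil => simp
  | cons x xs ih =>
    rw [List.length_cons, List.range_succ_eq_map, List.map_cons, List.map_map,
        List.zip_cons_cons, List.countP_cons, List.countP_cons, ih (f ∘ Nat.succ)]
    simp [List.countP_map, Function.comp_def]

-- B's score of a pattern equals A's accumulator for that pattern
theorem pvScore_eq (answers p : List Int) (hp : p ≠ []) (m : Int) (hm : (p.length : Int) = m) :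
    ((answers.zip (PySem.List.slice
        ((List.replicate ((PySem.Int.floordiv (answers.length : Int) (p.length : Int)) + 1).toNat p).flatten)
        none (some (answers.length : Int)))).map
      (fun ab => if ab.1 == ab.2 then (1 : Int) else 0)).sum
    = (PySem.List.pyRange 0 (answers.length : Int) 1).foldl
        (fun acc i =>
          if PySem.List.pyGetD answers i 0 = PySem.List.pyGetD p (PySem.Int.mod i m) 0
          then acc + 1 else acc) 0 := by
  subst hm
  have hp0 : 0 < p.length := List.length_pos_iff.mpr hp
  rw [PySem.List.foldl_ite_add_one, zero_add, PySem.List.pyRange_zero_nat, List.countP_map]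
  rw [PySem.Int.floordiv_natCast]
  have hk : (((answers.length / p.length : Nat) : Int) + 1).toNat = answers.length / p.length + 1 := by
    rw [show ((answers.length / p.length : Nat) : Int) + 1
          = ((answers.length / p.length + 1 : Nat) : Int) by push_cast; ring, Int.toNat_natCast]
  rw [hk, PySem.List.slice_to_natCast, pvTile_eq p hp _ answers.length (by
    have h1 := Nat.div_add_mod answers.length p.length
    have h2 := Nat.mod_lt answers.length hp0
    rw [Nat.add_mul, one_mul, Nat.mul_comm (answers.length / p.length) p.length]
    omega)]
  rw [PySem.List.sum_map_ite_one_zero (α := Int × Int) (fun ab => ab.1 == ab.2)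
        (answers.zip ((List.range answers.length).map (fun i => p.getD (i % p.length) 0))),
      pvCountP_zip answers (fun i => p.getD (i % p.length) 0)]
  congr 1
  apply List.countP_congr
  intro i _
  simp only [Function.comp_def]
  rw [show PySem.Int.mod (i : Int) ((p.length : Nat) : Int) = ((i % p.length : Nat) : Int) from
        PySem.Int.mod_natCast i p.length,
      PySem.List.pyGetD_natCast, PySem.List.pyGetD_natCast]
  simp

-- the sort-and-take-ties selection on the three (-score, number) pairs equals A's cascade
set_option maxHeartbeats 1000000 in
theorem pvSelect_eq (a b c : Int) :
    (let rankedS := PySem.List.sorted2 [(-a, (1 : Int)), (-b, 2), (-c, 3)] (fun r => r.1) (fun r => r.2)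
     (rankedS.filter (fun r => r.1 == (PySem.List.pyGetD rankedS 0 ((0 : Int), (0 : Int))).1)).map (fun r => r.2))
    = (if a > b ∧ a > c then ([1] : List Int)
       else if b > a ∧ b > c then [2]
       else if c > a ∧ c > b then [3]
       else if a = b ∧ a > c then [1, 2]
       else if a = c ∧ a > b then [1, 3]
       else if b = c ∧ b > a then [2, 3]
       else [1, 2, 3]) := by
  rcases lt_trichotomy a b with h1 | h1 | h1 <;>
    rcases lt_trichotomy a c with h2 | h2 | h2 <;>
    rcases lt_trichotomy b c with h3 | h3 | h3 <;>
    simp [PySem.List.sorted2, PySem.List.insertBy, h1, h2, h3, neg_lt_neg_iff,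
      lt_asymm, List.filter] <;>
    (try (repeat' split)) <;> (try simp_all) <;> omega

-- ===== VERDICT =====
theorem solution_spec : Claim_equal_solution := by
  intro answers _
  unfold Spec_solution solution solution_alt
  simp only [PySem.List.enumerate_cons, PySem.List.enumerate_nil, List.foldl,
    List.nil_append, List.cons_append]
  rw [PySem.List.foldl_prod_mk
        (f := fun (acc : Int) i =>
          if PySem.List.pyGetD answers i 0 = PySem.List.pyGetD [1, 2, 3, 4, 5] (PySem.Int.mod i 5) 0
          then acc + 1 else acc)
        (g := fun (acc : Int × Int) i =>
          ((if PySem.List.pyGetD answers i 0 = PySem.List.pyGetD [2, 1, 2, 3, 2, 4, 2, 5] (PySem.Int.mod i 8) 0 then acc.1 + 1 else acc.1),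
           (if PySem.List.pyGetD answers i 0 = PySem.List.pyGetD [3, 3, 1, 1, 2, 2, 4, 4, 5, 5] (PySem.Int.mod i 10) 0 then acc.2 + 1 else acc.2)))]
  rw [PySem.List.foldl_prod_mk
        (f := fun (acc : Int) i =>
          if PySem.List.pyGetD answers i 0 = PySem.List.pyGetD [2, 1, 2, 3, 2, 4, 2, 5] (PySem.Int.mod i 8) 0
          then acc + 1 else acc)
        (g := fun (acc : Int) i =>
          if PySem.List.pyGetD answers i 0 = PySem.List.pyGetD [3, 3, 1, 1, 2, 2, 4, 4, 5, 5] (PySem.Int.mod i 10) 0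
          then acc + 1 else acc)]
  rw [← pvScore_eq answers [1, 2, 3, 4, 5] (by simp) 5 (by norm_num),
      ← pvScore_eq answers [2, 1, 2, 3, 2, 4, 2, 5] (by simp) 8 (by norm_num),
      ← pvScore_eq answers [3, 3, 1, 1, 2, 2, 4, 4, 5, 5] (by simp) 10 (by norm_num)]
  exact (pvSelect_eq _ _ _).symm
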